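-- pv_equiv track=rewrite | github.com/mkXultra/mew | src/mew/implement_lane/native_finish_gate.py | _contains_unquoted_control
-- ===== SOURCE A (Python) =====
-- def _contains_unquoted_control(command: str, controls: tuple[str, ...]) -> bool:
--     in_single = False
--     in_double = False
--     escaped = False
--     for char in command:
--         if escaped:
--             escaped = False
--             continue
--         if char == "\\":
--             escaped = True
--             continue
--         if char == "'" and not in_double:
--             in_single = not in_single
--             continue
--         if char == '"' and not in_single:
--             in_double = not in_double
--             continue
--         if not in_single and not in_double and char in controls:
--             return True
--     return False
-- ===== SOURCE B (Python) =====
-- def _contains_unquoted_control(command: str, controls: tuple[str, ...]) -> bool: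
--     # Pass 1: splice out backslash escapes (backslash + following char) using find/slices.
--     parts = []
--     rest = command
--     while True:
--         j = rest.find("\\")
--         if j == -1:
--             parts.append(rest)
--             break
--         parts.append(rest[:j])
--         rest = rest[j + 2:]  # a trailing backslash just disappears
--     stripped = "".join(parts)
--     # Pass 2: region scan of the escape-free text: text before the first quote is
--     # unquoted; a quoted region runs to the next identical quote character.
--     rest = stripped
--     while True:
--         q = next((k for k, ch in enumerate(rest) if ch in "'\""), -1)
--         if q == -1:
--             return any(ch in controls for ch in rest)
--         if any(ch in controls for ch in rest[:q]):
--             return True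
--         close = rest.find(rest[q], q + 1)
--         if close == -1:
--             return False
--         rest = rest[close + 1:]
-- ===== Notes on version B (the rewrite author's own statement) =====
-- stated objective: alternative
-- what changed: B replaces A's per-character boolean state machine by two slice-splicing passes: escape pairs are cut out with find/slices, then the escape-free text is scanned region by region (unquoted segment up to the next quote, then skip to the matching close quote) using find, with no in_single/in_double/escaped flags.
import Mathlib
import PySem

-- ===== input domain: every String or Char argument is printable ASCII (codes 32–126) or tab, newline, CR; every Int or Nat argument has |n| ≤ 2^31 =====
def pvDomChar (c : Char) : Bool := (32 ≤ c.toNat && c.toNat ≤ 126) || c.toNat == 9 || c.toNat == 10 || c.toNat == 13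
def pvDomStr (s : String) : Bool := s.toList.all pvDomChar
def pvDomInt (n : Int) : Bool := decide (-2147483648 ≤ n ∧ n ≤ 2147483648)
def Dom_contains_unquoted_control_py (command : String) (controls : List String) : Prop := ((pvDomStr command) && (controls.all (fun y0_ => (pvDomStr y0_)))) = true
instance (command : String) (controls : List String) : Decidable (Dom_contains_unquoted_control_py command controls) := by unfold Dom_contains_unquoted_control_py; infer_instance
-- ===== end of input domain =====

-- B replaces A's per-character flag state machine by two find/slice passes (splice out escape
-- pairs, then scan quote-delimited regions); same return value (alternative decomposition).
-- ===== PORT A =====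
-- A's loop: early return true on an unquoted control char; state (in_single, in_double, escaped).
def cucLoopA (controls : List String) : List Char → Bool → Bool → Bool → Bool
  | [], _, _, _ => false
  | c :: rest, in_single, in_double, escaped =>
    if escaped then cucLoopA controls rest in_single in_double false
    else if c = '\\' then cucLoopA controls rest in_single in_double true
    else if c = '\'' ∧ ¬ in_double then cucLoopA controls rest (!in_single) in_double escaped
    else if c = '"' ∧ ¬ in_single then cucLoopA controls rest in_single (!in_double) escaped
    else if ¬ in_single ∧ ¬ in_double ∧ controls.contains (String.ofList [c]) then true
    else cucLoopA controls rest in_single in_double escaped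

def contains_unquoted_control_py (command : String) (controls : List String) : Bool :=
  cucLoopA controls command.toList false false false

-- ===== PORT B =====
-- B's pass 1: splice out backslash escape pairs via find ('rest = rest[j+2:]' loop).
def cucStripLoop (cs : List Char) : List Char :=
  match h : cs.findIdx? (· = '\\') with
  | none => cs
  | some j => cs.take j ++ cucStripLoop (cs.drop (j + 2))
termination_by cs.length
decreasing_by
  have hj : j < cs.length := (List.findIdx?_eq_some_iff_findIdx_eq.mp h).1
  have : 0 < cs.length := Nat.lt_of_le_of_lt (Nat.zero_le _) hj
  simp [List.length_drop]; omega

-- B's pass 2: region scan of the escape-free text via next(enumerate)/find.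
def cucRegionScan (controls : List String) (cs : List Char) : Bool :=
  match hq : cs.findIdx? (fun c => c = '\'' ∨ c = '"') with
  | none => cs.any (fun c => controls.contains (String.ofList [c]))
  | some q =>
    if (cs.take q).any (fun c => controls.contains (String.ofList [c])) then true
    else
      match hd : cs.drop q with
      | [] => false
      | qc :: r =>
        match r.findIdx? (· = qc) with
        | none => false
        | some i => cucRegionScan controls (r.drop (i + 1))
termination_by cs.length
decreasing_by
  have hqlen : q < cs.length := (List.findIdx?_eq_some_iff_findIdx_eq.mp hq).1
  have hlen : (cs.drop q).length = cs.length - q := List.length_drop ..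
  have : r.length + 1 = cs.length - q := by rw [← hlen, hd]; simp
  simp [List.length_drop]; omega

def contains_unquoted_control_py_alt (command : String) (controls : List String) : Bool :=
  cucRegionScan controls (cucStripLoop command.toList)

-- ===== PRECONDITION & SPEC =====
def Spec_contains_unquoted_control_py (command : String) (controls : List String) (out : Bool) : Prop := out = contains_unquoted_control_py_alt command controls
instance (command : String) (controls : List String) (out : Bool) : Decidable (Spec_contains_unquoted_control_py command controls out) := by unfold Spec_contains_unquoted_control_py; infer_instance

-- ===== CLAIM (what is proved, stated in full; the proofs are below) =====
def Claim_equal_contains_unquoted_control_py : Prop := ∀ (command : String) (controls : List String), Dom_contains_unquoted_control_py command controls → Spec_contains_unquoted_control_py command controls (contains_unquoted_control_py command controls)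

-- ===== LEMMAS AND PROOFS =====

-- Intermediate machine (proof device): A's loop with the escape layer removed.
def cucNoEsc (controls : List String) : List Char → Bool → Bool → Bool
  | [], _, _ => false
  | c :: rest, in_single, in_double =>
    if c = '\'' ∧ ¬ in_double then cucNoEsc controls rest (!in_single) in_double
    else if c = '"' ∧ ¬ in_single then cucNoEsc controls rest in_single (!in_double)
    else if ¬ in_single ∧ ¬ in_double ∧ controls.contains (String.ofList [c]) then true
    else cucNoEsc controls rest in_single in_double

-- A backslash-free prefix is processed identically by A's loop and the no-escape machine.
theorem cucLoopA_append_free (controls : List String) (A : List Char)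
    (h : ∀ x ∈ A, x ≠ '\\') (rest X : List Char)
    (hrec : ∀ s d : Bool, cucLoopA controls rest s d false = cucNoEsc controls X s d) :
    ∀ s d : Bool, cucLoopA controls (A ++ rest) s d false = cucNoEsc controls (A ++ X) s d := by
  induction A with
  | nil => simpa using hrec
  | cons a A ih =>
    intro s d
    have ha : a ≠ '\\' := h a (List.mem_cons_self ..)
    have hA : ∀ x ∈ A, x ≠ '\\' := fun x hx => h x (List.mem_cons_of_mem _ hx)
    simp only [List.cons_append, cucLoopA, cucNoEsc,
      if_neg (by simp : ¬ (false = true)), if_neg ha]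
    split_ifs <;> first | rfl | exact ih hA _ _

-- With no backslash at all, A's loop is the no-escape machine.
theorem cucLoopA_free (controls : List String) (cs : List Char)
    (h : ∀ x ∈ cs, x ≠ '\\') :
    ∀ s d : Bool, cucLoopA controls cs s d false = cucNoEsc controls cs s d := by
  have := cucLoopA_append_free controls cs h [] []
    (by intro s d; simp [cucLoopA, cucNoEsc])
  simpa using this

-- A quote-free prefix contributes its own control test in unquoted mode.
theorem cucNoEsc_unquoted_free (controls : List String) (A rest : List Char)
    (h : ∀ x ∈ A, ¬(x = '\'' ∨ x = '"')) :
    cucNoEsc controls (A ++ rest) false false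
      = ((A.any fun c => controls.contains (String.ofList [c]))
          || cucNoEsc controls rest false false) := by
  induction A with
  | nil => simp
  | cons a A ih =>
    have ha := h a (List.mem_cons_self ..)
    have hA : ∀ x ∈ A, ¬(x = '\'' ∨ x = '"') := fun x hx => h x (List.mem_cons_of_mem _ hx)
    push_neg at ha
    have step : ∀ X, cucNoEsc controls (a :: X) false false
        = (controls.contains (String.ofList [a]) || cucNoEsc controls X false false) := by
      intro X
      by_cases hctl : controls.contains (String.ofList [a]) = true <;>
        simp [cucNoEsc, ha.1, ha.2, hctl]
    rw [List.cons_append, step, ih hA]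
    simp [Bool.or_assoc]

-- Inside quotes, characters other than the closing quote are skipped.
theorem cucNoEsc_single_free (controls : List String) (C rest : List Char)
    (h : ∀ x ∈ C, x ≠ '\'') :
    cucNoEsc controls (C ++ rest) true false = cucNoEsc controls rest true false := by
  induction C with
  | nil => simp
  | cons c C ih =>
    have hc : c ≠ '\'' := h c (List.mem_cons_self ..)
    have hC : ∀ x ∈ C, x ≠ '\'' := fun x hx => h x (List.mem_cons_of_mem _ hx)
    have step : ∀ X, cucNoEsc controls (c :: X) true false = cucNoEsc controls X true false := by
      intro X; simp [cucNoEsc, hc]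
    rw [List.cons_append, step]
    exact ih hC

theorem cucNoEsc_double_free (controls : List String) (C rest : List Char)
    (h : ∀ x ∈ C, x ≠ '"') :
    cucNoEsc controls (C ++ rest) false true = cucNoEsc controls rest false true := by
  induction C with
  | nil => simp
  | cons c C ih =>
    have hc : c ≠ '"' := h c (List.mem_cons_self ..)
    have hC : ∀ x ∈ C, x ≠ '"' := fun x hx => h x (List.mem_cons_of_mem _ hx)
    have step : ∀ X, cucNoEsc controls (c :: X) false true = cucNoEsc controls X false true := by
      intro X; simp [cucNoEsc, hc]
    rw [List.cons_append, step]
    exact ih hC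

-- An unterminated quoted region yields false.
theorem cucNoEsc_single_tail (controls : List String) (C : List Char)
    (h : ∀ x ∈ C, x ≠ '\'') : cucNoEsc controls C true false = false := by
  have := cucNoEsc_single_free controls C [] h
  simpa [cucNoEsc] using this

theorem cucNoEsc_double_tail (controls : List String) (C : List Char)
    (h : ∀ x ∈ C, x ≠ '"') : cucNoEsc controls C false true = false := by
  have := cucNoEsc_double_free controls C [] h
  simpa [cucNoEsc] using this

-- Quote steps.
theorem cucNoEsc_open_single (controls : List String) (rest : List Char) :
    cucNoEsc controls ('\'' :: rest) false false = cucNoEsc controls rest true false := by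
  simp [cucNoEsc]

theorem cucNoEsc_open_double (controls : List String) (rest : List Char) :
    cucNoEsc controls ('"' :: rest) false false = cucNoEsc controls rest false true := by
  simp [cucNoEsc]

theorem cucNoEsc_close_single (controls : List String) (rest : List Char) :
    cucNoEsc controls ('\'' :: rest) true false = cucNoEsc controls rest false false := by
  simp [cucNoEsc]

theorem cucNoEsc_close_double (controls : List String) (rest : List Char) :
    cucNoEsc controls ('"' :: rest) false true = cucNoEsc controls rest false false := by
  simp [cucNoEsc]

-- Layer 1: A's loop equals the no-escape machine on the escape-spliced text.
theorem cucLoop_eq_noEsc (controls : List String) (n : ℕ) :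
    ∀ cs : List Char, cs.length ≤ n → ∀ s d : Bool,
      cucLoopA controls cs s d false = cucNoEsc controls (cucStripLoop cs) s d := by
  induction n with
  | zero =>
    intro cs h s d
    have : cs = [] := List.eq_nil_of_length_eq_zero (Nat.le_zero.mp h)
    subst this
    rw [cucStripLoop]
    simp [cucLoopA, cucNoEsc]
  | succ n ih =>
    intro cs hlen s d
    rw [cucStripLoop]
    split
    · rename_i hb
      have hfree : ∀ x ∈ cs, x ≠ '\\' := by
        simpa [List.findIdx?_eq_none_iff] using hb
      exact cucLoopA_free controls cs hfree s d
    · rename_i j hb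
      obtain ⟨hj, hpj, hmin⟩ := List.findIdx?_eq_some_iff_getElem.mp hb
      have hfreeA : ∀ x ∈ cs.take j, x ≠ '\\' := by
        intro x hx
        obtain ⟨k, hk, rfl⟩ := List.getElem_of_mem hx
        have hk' : k < j := by
          have := hk; simp [List.length_take] at this; omega
        have := hmin k hk'
        rw [List.getElem_take] at *
        simpa using this
      have hcsj : cs[j] = '\\' := by simpa using hpj
      have hsplit : cs.take j ++ cs.drop j = cs := List.take_append_drop ..
      have hdropj : cs.drop j = '\\' :: cs.drop (j + 1) := by
        rw [List.drop_eq_getElem_cons hj, hcsj]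
      have hdd : cs.drop (j + 2) = (cs.drop (j + 1)).drop 1 := by
        rw [List.drop_drop]
      have hrec : ∀ s d : Bool,
          cucLoopA controls (cs.drop j) s d false
            = cucNoEsc controls (cucStripLoop (cs.drop (j + 2))) s d := by
        intro s d
        rw [hdropj]
        simp only [cucLoopA, if_neg (by simp : ¬ (false = true)), if_pos rfl]
        cases h1 : cs.drop (j + 1) with
        | nil =>
          have h2 : cs.drop (j + 2) = [] := by rw [hdd, h1]; rfl
          rw [h2, cucStripLoop]
          simp [cucLoopA, cucNoEsc]
        | cons x D =>
          have h2 : cs.drop (j + 2) = D := by rw [hdd, h1]; rfl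
          rw [h2]
          simp only [cucLoopA, if_pos rfl]
          have hD : D.length ≤ n := by
            have h3 : (cs.drop (j + 1)).length = cs.length - (j + 1) :=
              List.length_drop ..
            rw [h1] at h3
            simp at h3
            omega
          exact ih D hD s d
      have := cucLoopA_append_free controls (cs.take j) hfreeA (cs.drop j)
        (cucStripLoop (cs.drop (j + 2))) hrec s d
      rw [hsplit] at this
      exact this

-- Layer 2: the no-escape machine equals B's region scan.
theorem cucNoEsc_eq_region (controls : List String) (n : ℕ) :
    ∀ cs : List Char, cs.length ≤ n →
      cucNoEsc controls cs false false = cucRegionScan controls cs := by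
  induction n with
  | zero =>
    intro cs h
    have : cs = [] := List.eq_nil_of_length_eq_zero (Nat.le_zero.mp h)
    subst this
    rw [cucRegionScan]
    simp [cucNoEsc]
  | succ n ih =>
    intro cs hlen
    rw [cucRegionScan]
    split
    · rename_i hq
      have hfree : ∀ x ∈ cs, ¬ (x = '\'' ∨ x = '"') := by
        simpa [List.findIdx?_eq_none_iff] using hq
      have := cucNoEsc_unquoted_free controls cs [] hfree
      simpa [cucNoEsc] using this
    · rename_i q hq
      obtain ⟨hjlt, hpq, hmin⟩ := List.findIdx?_eq_some_iff_getElem.mp hq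
      have hfreeA : ∀ x ∈ cs.take q, ¬ (x = '\'' ∨ x = '"') := by
        intro x hx
        obtain ⟨k, hk, rfl⟩ := List.getElem_of_mem hx
        have hk' : k < q := by
          have := hk; simp [List.length_take] at this; omega
        have := hmin k hk'
        rw [List.getElem_take] at *
        simpa using this
      have hquote : cs[q] = '\'' ∨ cs[q] = '"' := by simpa using hpq
      have hsplit : cs.take q ++ cs.drop q = cs := List.take_append_drop ..
      have hdropq : cs.drop q = cs[q] :: cs.drop (q + 1) := List.drop_eq_getElem_cons hjlt
      have hL : cucNoEsc controls cs false false
          = ((cs.take q).any (fun c => controls.contains (String.ofList [c]))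
              || cucNoEsc controls (cs.drop q) false false) := by
        conv_lhs => rw [← hsplit]
        exact cucNoEsc_unquoted_free controls (cs.take q) (cs.drop q) hfreeA
      by_cases hA : ((cs.take q).any fun c => controls.contains (String.ofList [c])) = true
      · rw [if_pos hA, hL, hA]
        simp
      · rw [if_neg hA]
        have hA' : ((cs.take q).any fun c => controls.contains (String.ofList [c])) = false := by
          simpa using hA
        split
        · rename_i hd
          rw [hdropq] at hd
          cases hd
        · rename_i qc r hd
          rw [hdropq] at hd
          injection hd with h1 h2
          subst h1
          subst h2
          have hrlen : (cs.drop (q + 1)).length ≤ n := by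
            have := List.length_drop (l := cs) (i := q + 1)
            omega
          split
          · -- no closing quote: the quoted region runs to the end, both sides false
            rename_i hcl
            have hnone : ∀ x ∈ cs.drop (q + 1), x ≠ cs[q] := by
              simpa [List.findIdx?_eq_none_iff] using hcl
            have hquoted : cucNoEsc controls (cs.drop q) false false = false := by
              rw [hdropq]
              rcases hquote with h' | h'
              · rw [h', cucNoEsc_open_single]
                exact cucNoEsc_single_tail controls _ (by rw [← h']; exact hnone)
              · rw [h', cucNoEsc_open_double]
                exact cucNoEsc_double_tail controls _ (by rw [← h']; exact hnone)
            rw [hL, hquoted, hA']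
            rfl
          · -- closing quote found at offset i of the remainder
            rename_i i hcl
            obtain ⟨hilt, hpi, himin⟩ := List.findIdx?_eq_some_iff_getElem.mp hcl
            have hql : (cs.drop (q + 1))[i] = cs[q] := by simpa using hpi
            have hfreeC : ∀ x ∈ (cs.drop (q + 1)).take i, x ≠ cs[q] := by
              intro x hx
              obtain ⟨k, hk, rfl⟩ := List.getElem_of_mem hx
              have hk' : k < i := by
                have := hk; simp [List.length_take] at this; omega
              have := himin k hk'
              rw [List.getElem_take] at *
              simpa using this
            have hsplitC : ((cs.drop (q + 1)).take i) ++ (cs.drop (q + 1)).drop i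
                = cs.drop (q + 1) := List.take_append_drop ..
            have hdropi : (cs.drop (q + 1)).drop i
                = cs[q] :: (cs.drop (q + 1)).drop (i + 1) := by
              rw [List.drop_eq_getElem_cons hilt, hql]
            have hlen2 : ((cs.drop (q + 1)).drop (i + 1)).length ≤ n := by
              have h1 := List.length_drop (l := cs.drop (q + 1)) (i := i + 1)
              have h2 := List.length_drop (l := cs) (i := q + 1)
              omega
            have hquoted : cucNoEsc controls (cs.drop q) false false
                = cucNoEsc controls ((cs.drop (q + 1)).drop (i + 1)) false false := by
              rw [hdropq]
              rcases hquote with h' | h'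
              · rw [h', cucNoEsc_open_single]
                conv_lhs => rw [← hsplitC]
                rw [cucNoEsc_single_free controls _ _ (by rw [← h']; exact hfreeC),
                  hdropi, h', cucNoEsc_close_single]
              · rw [h', cucNoEsc_open_double]
                conv_lhs => rw [← hsplitC]
                rw [cucNoEsc_double_free controls _ _ (by rw [← h']; exact hfreeC),
                  hdropi, h', cucNoEsc_close_double]
            rw [hL, hquoted, hA', ih _ hlen2]
            rfl

-- ===== VERDICT (by name: the statement is the Claim_ definition above) =====
theorem contains_unquoted_control_py_spec : Claim_equal_contains_unquoted_control_py := by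
  intro command controls _
  unfold Spec_contains_unquoted_control_py contains_unquoted_control_py contains_unquoted_control_py_alt
  rw [cucLoop_eq_noEsc controls command.toList.length command.toList le_rfl false false]
  exact cucNoEsc_eq_region controls (cucStripLoop command.toList).length
    (cucStripLoop command.toList) le_rfl
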